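-- pv_equiv track=rewrite | github.com/ChunBoo/JustUK | 368-longestincreasingdecreasingSubList.py | longestincreasingdecreasingSubList
-- ===== SOURCE A (Python) =====
-- def longestincreasingdecreasingSubList(nums):
--     sz=len(nums)
--     inc=[1]*sz
--     dec=[1]*sz
--     for i in range(1,sz):
--         if(nums[i]>nums[i-1]):
--             inc[i]+=inc[i-1]
--     for i in range(sz-2,-1,-1):
--         if(nums[i]>nums[i+1]):
--             dec[i]+=dec[i+1]
--     ans=0
--     for i in range(sz):
--         if(inc[i]>1 and dec[i]>1):
--             ans=max(ans,inc[i]+dec[i]-1) #dynamic programming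
--     return ans
-- ===== SOURCE B (Python) =====
-- def longestincreasingdecreasingSubList(nums):
--     up = down = ans = 0
--     for i in range(1, len(nums)):
--         if nums[i] > nums[i - 1]:
--             up = 1 if down > 0 else up + 1
--             down = 0
--         elif nums[i] < nums[i - 1]:
--             down += 1
--             if up > 0:
--                 ans = max(ans, up + down + 1)
--         else:
--             up = down = 0
--     return ans
-- ===== Notes on version B (the rewrite author's own statement) =====
-- stated objective: simpler
-- what changed: Replaced the two O(n) DP arrays (forward inc-run scan, backward dec-run scan, then a combining pass) by one forward pass keeping only three scalars: the current increasing-run length, the current decreasing-run length, and the running best mountain length.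
import Mathlib
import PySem

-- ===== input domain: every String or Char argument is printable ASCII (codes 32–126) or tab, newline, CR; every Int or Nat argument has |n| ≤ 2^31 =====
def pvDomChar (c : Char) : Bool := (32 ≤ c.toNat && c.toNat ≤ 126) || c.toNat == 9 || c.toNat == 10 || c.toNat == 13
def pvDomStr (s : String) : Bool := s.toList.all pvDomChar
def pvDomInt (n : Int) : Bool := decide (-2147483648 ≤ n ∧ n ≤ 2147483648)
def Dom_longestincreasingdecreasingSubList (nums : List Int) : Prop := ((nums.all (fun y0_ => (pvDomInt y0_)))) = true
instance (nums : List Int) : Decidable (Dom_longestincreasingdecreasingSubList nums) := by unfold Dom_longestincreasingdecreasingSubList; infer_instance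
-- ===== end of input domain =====

-- B replaces A's two DP arrays and three passes by a single pass with three scalar
-- counters (O(1) extra space); same return value, proved below.

-- ===== PORT A =====
def longestincreasingdecreasingSubList (nums : List Int) : Int :=
  let sz : Int := nums.length
  let inc0 : List Int := List.replicate nums.length 1
  let dec0 : List Int := List.replicate nums.length 1
  let inc := (PySem.List.pyRange 1 sz 1).foldl (fun a i =>
      if PySem.List.pyGetD nums i 0 > PySem.List.pyGetD nums (i-1) 0 then
        PySem.List.pySetD a i (PySem.List.pyGetD a i 0 + PySem.List.pyGetD a (i-1) 0)
      else a) inc0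
  let dec := (PySem.List.pyRange (sz-2) (-1) (-1)).foldl (fun a i =>
      if PySem.List.pyGetD nums i 0 > PySem.List.pyGetD nums (i+1) 0 then
        PySem.List.pySetD a i (PySem.List.pyGetD a i 0 + PySem.List.pyGetD a (i+1) 0)
      else a) dec0
  (PySem.List.pyRange 0 sz 1).foldl (fun ans i =>
      if PySem.List.pyGetD inc i 0 > 1 ∧ PySem.List.pyGetD dec i 0 > 1 then
        max ans (PySem.List.pyGetD inc i 0 + PySem.List.pyGetD dec i 0 - 1)
      else ans) 0

-- ===== PORT B =====
def longestincreasingdecreasingSubList_alt (nums : List Int) : Int :=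
  let st := (PySem.List.pyRange 1 (nums.length : Int) 1).foldl
    (fun (s : Int × Int × Int) i =>
      if PySem.List.pyGetD nums i 0 > PySem.List.pyGetD nums (i-1) 0 then
        ((if s.2.1 > 0 then 1 else s.1 + 1), 0, s.2.2)
      else if PySem.List.pyGetD nums i 0 < PySem.List.pyGetD nums (i-1) 0 then
        (s.1, s.2.1 + 1, if s.1 > 0 then max s.2.2 (s.1 + (s.2.1 + 1) + 1) else s.2.2)
      else (0, 0, s.2.2)) ((0 : Int), (0 : Int), (0 : Int))
  st.2.2

-- ===== PRECONDITION & SPEC =====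
def Spec_longestincreasingdecreasingSubList (nums : List Int) (out : Int) : Prop := out = longestincreasingdecreasingSubList_alt nums
instance (nums : List Int) (out : Int) : Decidable (Spec_longestincreasingdecreasingSubList nums out) := by unfold Spec_longestincreasingdecreasingSubList; infer_instance

-- ===== CLAIM (what is proved, stated in full; the proofs are below) =====
def Claim_equal_longestincreasingdecreasingSubList : Prop := ∀ (nums : List Int), Dom_longestincreasingdecreasingSubList nums → Spec_longestincreasingdecreasingSubList nums (longestincreasingdecreasingSubList nums)

-- ===== LEMMAS AND PROOFS =====

-- value at index j (indices used below are always < nums.length, so the default never matters)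
def pvG (nums : List Int) (j : Nat) : Int := nums.getD j 0

-- length of the strictly increasing run ending at index k (A's inc[k])
def pvInc (nums : List Int) : Nat → Nat
  | 0 => 1
  | k+1 => if pvG nums k < pvG nums (k+1) then pvInc nums k + 1 else 1

-- length of the strictly decreasing run starting at index k (A's dec[k])
def pvDec (nums : List Int) (k : Nat) : Nat :=
  if k + 1 < nums.length then
    (if pvG nums (k+1) < pvG nums k then pvDec nums (k+1) + 1 else 1)
  else 1
termination_by nums.length - k

-- number of strictly decreasing steps ending at index k (B's `down` counter)
def pvDd (nums : List Int) : Nat → Nat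
  | 0 => 0
  | k+1 => if pvG nums (k+1) < pvG nums k then pvDd nums k + 1 else 0

-- B's running answer after processing indices 1..k
def pvM (nums : List Int) : Nat → Nat
  | 0 => 0
  | k+1 => if pvG nums (k+1) < pvG nums k then
      (if 1 < pvInc nums (k+1 - pvDd nums (k+1)) then
         max (pvM nums k) (pvInc nums (k+1 - pvDd nums (k+1)) + pvDd nums (k+1))
       else pvM nums k)
    else pvM nums k

-- A's running answer after scanning indices 0..k
def pvAN (nums : List Int) : Nat → Nat
  | 0 => 0
  | k+1 => if 1 < pvInc nums (k+1) ∧ 1 < pvDec nums (k+1) then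
      max (pvAN nums k) (pvInc nums (k+1) + pvDec nums (k+1) - 1)
    else pvAN nums k

theorem pvDd_le (nums : List Int) (k : Nat) : pvDd nums k ≤ k := by
  induction k with
  | zero => simp [pvDd]
  | succ k ih => simp only [pvDd]; split <;> omega
theorem pvDd_steps (nums : List Int) (k m : Nat) (h1 : k - pvDd nums k ≤ m) (h2 : m < k) :
    pvG nums (m+1) < pvG nums m := by
  induction k generalizing m with
  | zero => omega
  | succ k ih =>
    simp only [pvDd] at h1
    split at h1
    · rcases Nat.lt_or_ge m k with hmk | hmk
      · exact ih m (by have := pvDd_le nums k; omega) hmk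
      · have : m = k := by omega
        subst this; assumption
    · omega
theorem pvDd_char (nums : List Int) (i j : Nat) (hij : i ≤ j)
    (hsteps : ∀ m, i ≤ m → m < j → pvG nums (m+1) < pvG nums m)
    (hstop : i = 0 ∨ ¬ pvG nums i < pvG nums (i-1)) :
    pvDd nums j = j - i := by
  induction j with
  | zero =>
    have : i = 0 := by omega
    subst this; simp [pvDd]
  | succ j ih =>
    rcases Nat.lt_or_ge i (j+1) with hlt | hge
    · have hd : pvG nums (j+1) < pvG nums j := hsteps j (by omega) (by omega)
      simp only [pvDd]
      rw [if_pos hd, ih (by omega) (fun m hm1 hm2 => hsteps m hm1 (by omega))]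
      omega
    · have : i = j + 1 := by omega
      subst this
      simp only [pvDd]
      rcases hstop with h0 | hns
      · omega
      · rw [if_neg (by simpa using hns)]; omega
theorem pvInc_pos (nums : List Int) (k : Nat) : 1 ≤ pvInc nums k := by
  cases k with
  | zero => simp [pvInc]
  | succ k => simp only [pvInc]; split <;> omega
theorem pvDec_pos (nums : List Int) (k : Nat) : 1 ≤ pvDec nums k := by
  rw [pvDec]; split <;> [skip; omega]
  split <;> omega
theorem pvInc_gt_one (nums : List Int) (k : Nat) (h : 1 < pvInc nums k) :
    1 ≤ k ∧ pvG nums (k-1) < pvG nums k := by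
  cases k with
  | zero => simp [pvInc] at h
  | succ k =>
    simp only [pvInc] at h
    split at h
    · exact ⟨by omega, by simpa using ‹pvG nums k < pvG nums (k+1)›⟩
    · omega
theorem pvDec_ge (nums : List Int) (i e : Nat) (hie : i ≤ e) (he : e < nums.length)
    (hsteps : ∀ m, i ≤ m → m < e → pvG nums (m+1) < pvG nums m) :
    e - i + 1 ≤ pvDec nums i := by
  induction h : e - i generalizing i with
  | zero => have := pvDec_pos nums i; omega
  | succ t ih =>
    have hlt : i < e := by omega
    rw [pvDec, if_pos (by omega), if_pos (hsteps i (le_refl i) hlt)]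
    have := ih (i+1) (by omega) (fun m hm1 hm2 => hsteps m (by omega) hm2) (by omega)
    omega
theorem pvDec_ub (nums : List Int) (i : Nat) (hi : i < nums.length) :
    i + pvDec nums i ≤ nums.length := by
  induction h : nums.length - i generalizing i with
  | zero => omega
  | succ t ih =>
    rw [pvDec]
    split
    · split
      · have := ih (i+1) (by omega) (by omega)
        omega
      · omega
    · omega
theorem pvDec_steps (nums : List Int) (i m : Nat) (him : i ≤ m)
    (hm : m + 1 < i + pvDec nums i) : pvG nums (m+1) < pvG nums m := by
  induction h : m - i generalizing i with
  | zero =>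
    have : m = i := by omega
    subst this
    rw [pvDec] at hm
    split at hm
    · split at hm
      · assumption
      · omega
    · omega
  | succ t ih =>
    have hlt : i < m := by omega
    have hstep : pvG nums (i+1) < pvG nums i := by
      rw [pvDec] at hm
      split at hm
      · split at hm
        · assumption
        · omega
      · omega
    refine ih (i+1) (by omega) ?_ (by omega)
    rw [pvDec, if_pos ?_, if_pos hstep] at hm
    · omega
    · rw [pvDec] at hm
      split at hm
      · have := pvDec_pos nums (i+1); omega
      · omega
theorem pvDd_pos (nums : List Int) (k : Nat) (h : 0 < pvDd nums k) :
    1 ≤ k ∧ pvG nums k < pvG nums (k-1) ∧ pvInc nums k = 1 := by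
  cases k with
  | zero => simp [pvDd] at h
  | succ k =>
    simp only [pvDd] at h
    split at h
    · refine ⟨by omega, by simpa using ‹pvG nums (k+1) < pvG nums k›, ?_⟩
      simp only [pvInc]
      rw [if_neg (by omega)]
    · omega
theorem pvM_mono (nums : List Int) (k k' : Nat) (h : k ≤ k') : pvM nums k ≤ pvM nums k' := by
  induction k' with
  | zero => simp_all
  | succ k' ih =>
    rcases Nat.lt_or_ge k (k'+1) with hlt | hge
    · have := ih (by omega)
      simp only [pvM]
      split
      · split <;> omega
      · omega
    · have : k = k' + 1 := by omega
      subst this; exact le_refl _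
theorem pvAN_mono (nums : List Int) (k k' : Nat) (h : k ≤ k') : pvAN nums k ≤ pvAN nums k' := by
  induction k' with
  | zero => simp_all
  | succ k' ih =>
    rcases Nat.lt_or_ge k (k'+1) with hlt | hge
    · have := ih (by omega)
      simp only [pvAN]
      split <;> omega
    · have : k = k' + 1 := by omega
      subst this; exact le_refl _
theorem term_le_M (nums : List Int) (j k : Nat) (hj : j + 1 ≤ k)
    (hdown : pvG nums (j+1) < pvG nums j)
    (hinc : 1 < pvInc nums (j+1 - pvDd nums (j+1))) :
    pvInc nums (j+1 - pvDd nums (j+1)) + pvDd nums (j+1) ≤ pvM nums k := by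
  have hbase : pvInc nums (j+1 - pvDd nums (j+1)) + pvDd nums (j+1) ≤ pvM nums (j+1) := by
    simp only [pvM]
    rw [if_pos hdown, if_pos hinc]
    omega
  exact le_trans hbase (pvM_mono nums (j+1) k hj)
theorem term_le_AN (nums : List Int) (i m : Nat) (him : i ≤ m)
    (h1 : 1 < pvInc nums i) (h2 : 1 < pvDec nums i) :
    pvInc nums i + pvDec nums i - 1 ≤ pvAN nums m := by
  induction m with
  | zero =>
    have : i = 0 := by omega
    subst this
    simp [pvInc] at h1
  | succ m ih =>
    rcases Nat.lt_or_ge i (m+1) with hlt | hge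
    · exact le_trans (ih (by omega)) (pvAN_mono nums m (m+1) (by omega))
    · have : i = m + 1 := by omega
      subst this
      simp only [pvAN]
      rw [if_pos ⟨h1, h2⟩]
      omega
theorem M_le_AN (nums : List Int) (k : Nat) (hk : k ≤ nums.length - 1) :
    pvM nums k ≤ pvAN nums (nums.length - 1) := by
  induction k with
  | zero => simp [pvM]
  | succ k ih =>
    simp only [pvM]
    split
    · split
      · rename_i hdown hinc
        refine max_le (ih (by omega)) ?_
        set p := k + 1 - pvDd nums (k+1) with hp
        have hdd1 : 0 < pvDd nums (k+1) := by
          simp only [pvDd]; rw [if_pos (by simpa using hdown)]; omega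
        have hddle := pvDd_le nums (k+1)
        have hk1 : k + 1 < nums.length := by omega
        have hdec : pvDd nums (k+1) + 1 ≤ pvDec nums p := by
          have := pvDec_ge nums p (k+1) (by omega) hk1
            (fun m hm1 hm2 => pvDd_steps nums (k+1) m (by omega) hm2)
          omega
        have := term_le_AN nums p (nums.length - 1) (by omega) hinc (by omega)
        omega
      · exact ih (by omega)
    · exact ih (by omega)
theorem AN_le_M (nums : List Int) (m : Nat) (hm : m ≤ nums.length - 1) :
    pvAN nums m ≤ pvM nums (nums.length - 1) := by
  induction m with
  | zero => simp [pvAN]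
  | succ m ih =>
    simp only [pvAN]
    split
    · rename_i hcond
      obtain ⟨h1, h2⟩ := hcond
      refine max_le (ih (by omega)) ?_
      set i := m + 1 with hi
      have hilen : i < nums.length := by omega
      have hub := pvDec_ub nums i hilen
      set j := i + pvDec nums i - 1 with hj
      have hji : i + 1 ≤ j := by omega
      have hjlen : j ≤ nums.length - 1 := by omega
      have hsteps : ∀ m', i ≤ m' → m' < j → pvG nums (m'+1) < pvG nums m' := by
        intro m' hm1 hm2
        exact pvDec_steps nums i m' hm1 (by omega)
      have hstop : i = 0 ∨ ¬ pvG nums i < pvG nums (i-1) := by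
        right
        have := (pvInc_gt_one nums i h1).2
        exact not_lt.mpr (le_of_lt this)
      have hdd : pvDd nums j = j - i := pvDd_char nums i j (by omega) hsteps hstop
      have hdown : pvG nums ((j-1)+1) < pvG nums (j-1) :=
        hsteps (j-1) (by omega) (by omega)
      have heq : j - 1 + 1 = j := by omega
      have hpi : j - (j - i) = i := by omega
      have hinc' : 1 < pvInc nums (j - 1 + 1 - pvDd nums (j - 1 + 1)) := by
        rw [heq, hdd, hpi]; exact h1
      have hterm := term_le_M nums (j-1) (nums.length - 1) (by omega) hdown hinc'
      rw [heq, hdd, hpi] at hterm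
      omega
    · exact ih (by omega)
theorem M_eq_AN (nums : List Int) : pvM nums (nums.length - 1) = pvAN nums (nums.length - 1) := by
  exact le_antisymm (M_le_AN nums _ (le_refl _)) (AN_le_M nums _ (le_refl _))

def pvStepInc (nums : List Int) (a : List Int) (i : Int) : List Int :=
  if PySem.List.pyGetD nums i 0 > PySem.List.pyGetD nums (i-1) 0 then
    PySem.List.pySetD a i (PySem.List.pyGetD a i 0 + PySem.List.pyGetD a (i-1) 0)
  else a

def pvStepDec (nums : List Int) (a : List Int) (i : Int) : List Int :=
  if PySem.List.pyGetD nums i 0 > PySem.List.pyGetD nums (i+1) 0 then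
    PySem.List.pySetD a i (PySem.List.pyGetD a i 0 + PySem.List.pyGetD a (i+1) 0)
  else a

def pvStepAns (inc dec : List Int) (ans : Int) (i : Int) : Int :=
  if PySem.List.pyGetD inc i 0 > 1 ∧ PySem.List.pyGetD dec i 0 > 1 then
    max ans (PySem.List.pyGetD inc i 0 + PySem.List.pyGetD dec i 0 - 1)
  else ans

theorem getD_set_lt (L : List Int) (n j : Nat) (v : Int) (hn : n < L.length) :
    (L.set n v).getD j 0 = if j = n then v else L.getD j 0 := by
  rw [List.getD_eq_getElem?_getD, List.getElem?_set, List.getD_eq_getElem?_getD]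
  by_cases h1 : n = j
  · subst h1
    rw [if_pos rfl, if_pos rfl]
    simp [hn]
  · rw [if_neg h1, if_neg (fun hh => h1 hh.symm)]

theorem getD_replicate_one (n j : Nat) (hj : j < n) :
    (List.replicate n (1:Int)).getD j 0 = 1 := by
  rw [List.getD_eq_getElem?_getD, List.getElem?_replicate]
  simp [hj]

theorem foldl_len_inc (nums : List Int) (r : List Int) (init : List Int) :
    (r.foldl (pvStepInc nums) init).length = init.length := by
  induction r generalizing init with
  | nil => rfl
  | cons x t ih =>
    rw [List.foldl_cons, ih]
    unfold pvStepInc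
    split
    · exact PySem.List.length_pySetD _ _ _
    · rfl

theorem incArr_spec (nums : List Int) (n : Nat) (hn : n ≤ nums.length) :
    ∀ j, j < nums.length →
      ((PySem.List.pyRange 1 ((n:Nat) : Int) 1).foldl (pvStepInc nums)
        (List.replicate nums.length (1:Int))).getD j 0
      = if j < n then (pvInc nums j : Int) else 1 := by
  induction n with
  | zero =>
    intro j hj
    rw [PySem.List.pyRange_one_eq_nil (by norm_num)]
    simp only [List.foldl_nil]
    rw [if_neg (by omega), getD_replicate_one _ _ hj]
  | succ n ih =>
    intro j hj
    rcases Nat.eq_zero_or_pos n with h0 | hpos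
    · subst h0
      rw [PySem.List.pyRange_one_eq_nil (by norm_num)]
      simp only [List.foldl_nil]
      rw [getD_replicate_one _ _ hj]
      split
      · rename_i hj1
        have : j = 0 := by omega
        subst this
        simp [pvInc]
      · rfl
    · have hrng : (PySem.List.pyRange 1 ((n+1 : Nat) : Int) 1)
          = PySem.List.pyRange 1 ((n : Nat) : Int) 1 ++ [((n : Nat) : Int)] := by
        have h1 : ((n+1 : Nat) : Int) = ((n : Nat) : Int) + 1 := by push_cast; ring
        rw [h1, PySem.List.pyRange_one_succ_right (by exact_mod_cast hpos)]
      rw [hrng, List.foldl_append]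
      simp only [List.foldl_cons, List.foldl_nil]
      set L := (PySem.List.pyRange 1 ((n : Nat) : Int) 1).foldl (pvStepInc nums)
        (List.replicate nums.length (1:Int)) with hL
      have hlen : L.length = nums.length := by
        rw [hL]; rw [foldl_len_inc]; exact List.length_replicate ..
      have hcast : (((n : Nat) : Int) - 1) = ((n-1 : Nat) : Int) := by omega
      unfold pvStepInc
      rw [PySem.List.pyGetD_natCast nums, hcast, PySem.List.pyGetD_natCast nums]
      have hn1 : (n - 1) + 1 = n := by omega
      have hIncN : pvInc nums n = if pvG nums (n-1) < pvG nums n then pvInc nums (n-1) + 1 else 1 := by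
        conv_lhs => rw [← hn1]
        rw [pvInc]
        rw [hn1]
      by_cases hup : pvG nums (n-1) < pvG nums n
      · rw [if_pos (by exact hup)]
        rw [PySem.List.pySetD_natCast, PySem.List.pyGetD_natCast, PySem.List.pyGetD_natCast]
        have hvn : L.getD n 0 = 1 := by rw [ih (by omega) n (by omega), if_neg (by omega)]
        have hvn1 : L.getD (n-1) 0 = (pvInc nums (n-1) : Int) := by
          rw [ih (by omega) (n-1) (by omega), if_pos (by omega)]
        rw [getD_set_lt L n j _ (by omega), hvn, hvn1]
        by_cases hjn : j = n
        · subst hjn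
          rw [if_pos rfl, if_pos (by omega), hIncN, if_pos hup]
          push_cast; ring
        · rw [if_neg hjn, ih (by omega) j hj]
          by_cases hjlt : j < n
          · rw [if_pos hjlt, if_pos (by omega)]
          · rw [if_neg hjlt, if_neg (by omega)]
      · rw [if_neg (by exact hup)]
        rw [ih (by omega) j hj]
        by_cases hjn : j = n
        · subst hjn
          rw [if_neg (by omega), if_pos (by omega), hIncN, if_neg hup]
          norm_num
        · by_cases hjlt : j < n
          · rw [if_pos hjlt, if_pos (by omega)]
          · rw [if_neg hjlt, if_neg (by omega)]

theorem decArr_spec (nums : List Int) (t : Nat) (L : List Int)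
    (hlen : L.length = nums.length) (ht : t + 1 ≤ nums.length)
    (hA : ∀ j, j < nums.length → t ≤ j → L.getD j 0 = (pvDec nums j : Int))
    (hB : ∀ j, j < t → L.getD j 0 = 1) :
    ∀ j, j < nums.length →
      ((PySem.List.pyRange (((t : Nat) : Int) - 1) (-1) (-1)).foldl (pvStepDec nums) L).getD j 0
        = (pvDec nums j : Int) := by
  induction t generalizing L with
  | zero =>
    intro j hj
    rw [PySem.List.pyRange_neg_one_eq_nil (by norm_num)]
    exact hA j hj (by omega)
  | succ t ih =>
    intro j hj
    have hrng : PySem.List.pyRange (((t+1 : Nat) : Int) - 1) (-1) (-1)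
        = ((t : Nat) : Int) :: PySem.List.pyRange (((t : Nat) : Int) - 1) (-1) (-1) := by
      have h1 : (((t+1 : Nat) : Int) - 1) = ((t : Nat) : Int) := by push_cast; ring
      rw [h1, PySem.List.pyRange_neg_one_cons (by omega)]
    rw [hrng, List.foldl_cons]
    have hcast : (((t : Nat) : Int) + 1) = ((t+1 : Nat) : Int) := by push_cast; ring
    have htlen : t + 1 < nums.length ∨ t + 1 = nums.length := by omega
    have hDecT : pvDec nums t = if t + 1 < nums.length then
        (if pvG nums (t+1) < pvG nums t then pvDec nums (t+1) + 1 else 1) else 1 := by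
      rw [pvDec]
    have hL' : ∀ j, j < nums.length →
        ((pvStepDec nums L ((t : Nat) : Int)).getD j 0)
          = if j = t then (pvDec nums t : Int) else L.getD j 0 := by
      intro j' hj'
      unfold pvStepDec
      rw [PySem.List.pyGetD_natCast nums, hcast, PySem.List.pyGetD_natCast nums]
      rcases htlen with hlt | heq
      · rw [hDecT, if_pos hlt]
        by_cases hdn : pvG nums (t+1) < pvG nums t
        · rw [if_pos (by exact hdn), PySem.List.pySetD_natCast,
            PySem.List.pyGetD_natCast, PySem.List.pyGetD_natCast]
          have hvt : L.getD t 0 = 1 := hB t (by omega)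
          have hvt1 : L.getD (t+1) 0 = (pvDec nums (t+1) : Int) := hA (t+1) hlt (by omega)
          rw [getD_set_lt L t j' _ (by omega), hvt, hvt1, if_pos hdn]
          split_ifs with h
          · push_cast; ring
          · rfl
        · rw [if_neg (by exact hdn), if_neg hdn]
          split_ifs with h
          · subst h; rw [hB j' (by omega)]; norm_num
          · rfl
      · exact absurd heq (by omega)
    have hres := ih (pvStepDec nums L ((t : Nat) : Int))
      (by unfold pvStepDec; split <;> simp [hlen])
      (by omega)
      (fun j' hj1 hj2 => by
        rw [hL' j' hj1]
        split_ifs with h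
        · subst h; rfl
        · exact hA j' hj1 (by omega))
      (fun j' hj1 => by
        rw [hL' j' (by omega)]
        rw [if_neg (by omega)]
        exact hB j' (by omega))
    exact hres j hj

theorem ansFold (nums inc dec : List Int)
    (hinc : ∀ j, j < nums.length → inc.getD j 0 = (pvInc nums j : Int))
    (hdec : ∀ j, j < nums.length → dec.getD j 0 = (pvDec nums j : Int))
    (n : Nat) (hn : n ≤ nums.length) :
    (PySem.List.pyRange 0 ((n : Nat) : Int) 1).foldl (pvStepAns inc dec) 0
      = (pvAN nums (n - 1) : Int) := by
  induction n with
  | zero =>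
    rw [PySem.List.pyRange_one_eq_nil (by norm_num)]
    simp [pvAN]
  | succ n ih =>
    have hrng : (PySem.List.pyRange 0 ((n+1 : Nat) : Int) 1)
        = PySem.List.pyRange 0 ((n : Nat) : Int) 1 ++ [((n : Nat) : Int)] := by
      have h1 : ((n+1 : Nat) : Int) = ((n : Nat) : Int) + 1 := by push_cast; ring
      rw [h1, PySem.List.pyRange_one_succ_right (by positivity)]
    rw [hrng, List.foldl_append, ih (by omega)]
    simp only [List.foldl_cons, List.foldl_nil]
    unfold pvStepAns
    rw [PySem.List.pyGetD_natCast, PySem.List.pyGetD_natCast, hinc n (by omega), hdec n (by omega)]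
    have hdp := pvDec_pos nums n
    have hip := pvInc_pos nums n
    cases n with
    | zero =>
      rw [if_neg (by simp [pvInc])]
    | succ m =>
      have hAN : pvAN nums (m+1) = if 1 < pvInc nums (m+1) ∧ 1 < pvDec nums (m+1) then
          max (pvAN nums m) (pvInc nums (m+1) + pvDec nums (m+1) - 1)
        else pvAN nums m := by rw [pvAN]
      simp only [Nat.add_sub_cancel]
      rw [hAN]
      by_cases hc : 1 < pvInc nums (m+1) ∧ 1 < pvDec nums (m+1)
      · rw [if_pos (⟨by exact_mod_cast hc.1, by exact_mod_cast hc.2⟩ :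
            (pvInc nums (m+1) : Int) > 1 ∧ (pvDec nums (m+1) : Int) > 1), if_pos hc]
        omega
      · rw [if_neg (fun h => hc ⟨by exact_mod_cast h.1, by exact_mod_cast h.2⟩), if_neg hc]

theorem bridgeA (nums : List Int) :
    longestincreasingdecreasingSubList nums = (pvAN nums (nums.length - 1) : Int) := by
  show (PySem.List.pyRange 0 ((nums.length : Nat) : Int) 1).foldl
      (pvStepAns
        ((PySem.List.pyRange 1 ((nums.length : Nat) : Int) 1).foldl (pvStepInc nums)
          (List.replicate nums.length (1:Int)))
        ((PySem.List.pyRange (((nums.length : Nat) : Int) - 2) (-1) (-1)).foldl (pvStepDec nums)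
          (List.replicate nums.length (1:Int)))) 0 = _
  have hinc : ∀ j, j < nums.length →
      ((PySem.List.pyRange 1 ((nums.length : Nat) : Int) 1).foldl (pvStepInc nums)
        (List.replicate nums.length (1:Int))).getD j 0 = (pvInc nums j : Int) := by
    intro j hj
    rw [incArr_spec nums nums.length (le_refl _) j hj, if_pos hj]
  have hdec : ∀ j, j < nums.length →
      ((PySem.List.pyRange (((nums.length : Nat) : Int) - 2) (-1) (-1)).foldl (pvStepDec nums)
        (List.replicate nums.length (1:Int))).getD j 0 = (pvDec nums j : Int) := by
    intro j hj
    have hpos : 1 ≤ nums.length := by omega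
    have hcast2 : ((nums.length : Nat) : Int) - 2 = ((nums.length - 1 : Nat) : Int) - 1 := by
      omega
    rw [hcast2]
    refine decArr_spec nums (nums.length - 1) (List.replicate nums.length (1:Int))
      (List.length_replicate ..) (by omega)
      (fun j' hj1 hj2 => ?_) (fun j' hj1 => getD_replicate_one _ _ (by omega)) j hj
    have hj' : j' = nums.length - 1 := by omega
    subst hj'
    rw [getD_replicate_one _ _ (by omega)]
    rw [pvDec, if_neg (by omega)]
    norm_num
  exact ansFold nums _ _ hinc hdec nums.length (le_refl _)

def pvStepB (nums : List Int) (s : Int × Int × Int) (i : Int) : Int × Int × Int :=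
  if PySem.List.pyGetD nums i 0 > PySem.List.pyGetD nums (i-1) 0 then
    ((if s.2.1 > 0 then 1 else s.1 + 1), 0, s.2.2)
  else if PySem.List.pyGetD nums i 0 < PySem.List.pyGetD nums (i-1) 0 then
    (s.1, s.2.1 + 1, if s.1 > 0 then max s.2.2 (s.1 + (s.2.1 + 1) + 1) else s.2.2)
  else (0, 0, s.2.2)

theorem stateB (nums : List Int) (k : Nat) (hk : k + 1 ≤ nums.length) :
    (PySem.List.pyRange 1 ((k+1 : Nat) : Int) 1).foldl (pvStepB nums) ((0:Int), (0:Int), (0:Int))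
      = ((pvInc nums (k - pvDd nums k) : Int) - 1, (pvDd nums k : Int), (pvM nums k : Int)) := by
  induction k with
  | zero =>
    rw [PySem.List.pyRange_one_eq_nil (by norm_num)]
    simp [pvInc, pvDd, pvM]
  | succ k ih =>
    have hrng : (PySem.List.pyRange 1 ((k+1+1 : Nat) : Int) 1)
        = PySem.List.pyRange 1 ((k+1 : Nat) : Int) 1 ++ [((k+1 : Nat) : Int)] := by
      have h1 : ((k+1+1 : Nat) : Int) = ((k+1 : Nat) : Int) + 1 := by push_cast; ring
      rw [h1, PySem.List.pyRange_one_succ_right (by push_cast; omega)]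
    rw [hrng, List.foldl_append, ih (by omega)]
    simp only [List.foldl_cons, List.foldl_nil]
    have hcast : (((k+1 : Nat) : Int) - 1) = ((k : Nat) : Int) := by push_cast; ring
    have hg1 : PySem.List.pyGetD nums ((k+1 : Nat) : Int) 0 = pvG nums (k+1) := by
      rw [PySem.List.pyGetD_natCast]; rfl
    have hg0 : PySem.List.pyGetD nums (((k+1 : Nat) : Int) - 1) 0 = pvG nums k := by
      rw [hcast, PySem.List.pyGetD_natCast]; rfl
    have hddle := pvDd_le nums k
    have hincpos := pvInc_pos nums (k - pvDd nums k)
    unfold pvStepB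
    rw [hg1, hg0]
    dsimp only
    rcases lt_trichotomy (pvG nums k) (pvG nums (k+1)) with hup | heq | hdn
    · rw [if_pos hup]
      have hdd : pvDd nums (k+1) = 0 := by
        simp only [pvDd]; rw [if_neg (not_lt.mpr (le_of_lt hup))]
      have hinc : pvInc nums (k+1) = pvInc nums k + 1 := by
        simp only [pvInc]; rw [if_pos hup]
      have hM : pvM nums (k+1) = pvM nums k := by
        simp only [pvM]; rw [if_neg (not_lt.mpr (le_of_lt hup))]
      rw [Prod.mk.injEq, Prod.mk.injEq]
      refine ⟨?_, by rw [hdd]; norm_num, by rw [hM]⟩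
      rw [hdd, Nat.sub_zero, hinc]
      rcases Nat.eq_zero_or_pos (pvDd nums k) with h0 | hpos
      · rw [h0, if_neg (by norm_num), Nat.sub_zero]
        push_cast; ring
      · have hinc1 := (pvDd_pos nums k hpos).2.2
        rw [if_pos (by exact_mod_cast hpos), hinc1]
        norm_num
    · rw [if_neg (by omega), if_neg (by omega)]
      have hdd : pvDd nums (k+1) = 0 := by
        simp only [pvDd]; rw [if_neg (by omega)]
      have hinc : pvInc nums (k+1) = 1 := by
        simp only [pvInc]; rw [if_neg (by omega)]
      have hM : pvM nums (k+1) = pvM nums k := by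
        simp only [pvM]; rw [if_neg (by omega)]
      rw [Prod.mk.injEq, Prod.mk.injEq]
      refine ⟨?_, by rw [hdd]; norm_num, by rw [hM]⟩
      rw [hdd, Nat.sub_zero, hinc]
      norm_num
    · rw [if_neg (not_lt.mpr (le_of_lt hdn)), if_pos hdn]
      have hdd : pvDd nums (k+1) = pvDd nums k + 1 := by
        simp only [pvDd]; rw [if_pos hdn]
      have hp : k + 1 - (pvDd nums k + 1) = k - pvDd nums k := by omega
      have hM : pvM nums (k+1) =
          if 1 < pvInc nums (k - pvDd nums k) then
            max (pvM nums k) (pvInc nums (k - pvDd nums k) + (pvDd nums k + 1))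
          else pvM nums k := by
        simp only [pvM]; rw [if_pos hdn, hdd, hp]
      rw [Prod.mk.injEq, Prod.mk.injEq]
      refine ⟨by rw [hdd, hp], by rw [hdd]; push_cast; ring, ?_⟩
      rw [hM]
      split_ifs <;> push_cast <;> omega

theorem bridgeB (nums : List Int) :
    longestincreasingdecreasingSubList_alt nums = (pvM nums (nums.length - 1) : Int) := by
  show ((PySem.List.pyRange 1 (nums.length : Int) 1).foldl (pvStepB nums)
      ((0:Int), (0:Int), (0:Int))).2.2 = _
  cases h : nums.length with
  | zero =>
    rw [PySem.List.pyRange_one_eq_nil (by norm_num)]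
    simp [pvM]
  | succ n =>
    rw [stateB nums n (by omega)]
    simp

-- ===== VERDICT (by name: the statement is the Claim_ definition above) =====
theorem longestincreasingdecreasingSubList_spec : Claim_equal_longestincreasingdecreasingSubList := by
  intro nums _
  unfold Spec_longestincreasingdecreasingSubList
  rw [bridgeA, bridgeB, M_eq_AN]
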